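-- pv_equiv track=rewrite | github.com/navidZee/university-sadjad | Theory-Lab/Assignment-9/test.py | q0
-- ===== SOURCE A (Python) =====
-- string="aabbbbba"
--
-- def q0(i):
--     if i<len(string) and string[i]=='a':
--          result=q0(i+1)
--          if result==True:
--             return True
--
--     if i<len(string) and string[i]=='b':
--         result=q1(i+1)
--         if result==True:
--             return True
--
--     return False
--
-- def q1(i):
--     if i<len(string) and string[i]=='a':
--          result=q1(i+1)
--          if result==True:
--             return True
--
--     if i<len(string) and string[i]=='b':
--         result=q2(i+1)
--         if result==True:
--             return True
--
--     return False
--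
-- def q2(i):
--     if i<len(string) and string[i]=='a':
--          result=q2(i+1)
--          if result==True:
--             return True
--
--     if i<len(string) and string[i]=='b':
--         result=q3(i+1)
--         if result==True:
--             return True
--
--     return False
--
-- def q3(i):
--     if i<len(string) and string[i]=='a':
--          result=q3(i+1)
--          if result==True:
--             return True
--
--     if i<len(string) and string[i]=='b':
--         result=q4(i+1)
--         if result==True:
--             return True
--
--     return False
--
-- def q4(i):
--     if i<len(string) and string[i]=='a':
--         result=q4(i+1)
--         if result==True:
--             return True
--
--     if i<len(string) and string[i]=='b':
--         result=q5(i+1)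
--         if result==True:
--             return True
--
--     return False
--
-- def q5(i):
--     if i<len(string) and string[i]=='a':
--         result=q5(i+1)
--         if result==True:
--             return True
--
--     if i<len(string) and string[i]=='b':
--         result=q5(i+1)
--         if result==True:
--             return True
--
--     if i<len(string) and string[i]=='a':
--         result=q6(i+1)
--         if result==True:
--             return True
--
--
--
--
--     return False
--
-- def q6(i):
--     if i==len(string):
--         return True
--     else:
--         return False
-- ===== SOURCE B (Python) =====
-- TRANS = {0:{'a':{0},'b':{1}},1:{'a':{1},'b':{2}},2:{'a':{2},'b':{3}},
--          3:{'a':{3},'b':{4}},4:{'a':{4},'b':{5}},5:{'a':{5,6},'b':{5}},6:{}}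
-- def q0(i):
--     s = "aabbbbba"
--     active = {0}
--     while i < len(s) and active:
--         c = s[i]
--         active = {t for st in active for t in TRANS[st].get(c, set())}
--         i += 1
--     return i == len(s) and 6 in active
-- ===== Notes on version B (the rewrite author's own statement) =====
-- stated objective: idiomatic
-- what changed: Replaced the seven mutually recursive state functions (DFS with backtracking over the NFA) by one iterative breadth-first NFA simulation that keeps a set of active states driven by a transition table, checking acceptance only when the index reaches the end of the fixed string.
import Mathlib
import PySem

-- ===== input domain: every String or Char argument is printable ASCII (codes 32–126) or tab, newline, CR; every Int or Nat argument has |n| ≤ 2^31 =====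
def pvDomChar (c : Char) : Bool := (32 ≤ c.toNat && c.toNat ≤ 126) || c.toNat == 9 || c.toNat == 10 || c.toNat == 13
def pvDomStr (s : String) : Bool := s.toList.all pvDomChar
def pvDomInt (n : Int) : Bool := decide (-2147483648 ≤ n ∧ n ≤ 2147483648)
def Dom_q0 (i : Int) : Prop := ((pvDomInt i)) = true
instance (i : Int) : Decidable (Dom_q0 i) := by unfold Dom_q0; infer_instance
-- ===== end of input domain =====

-- B replaces A's seven mutually recursive state functions (backtracking DFS) by one
-- iterative NFA simulation over a set of active states (objective: idiomatic).
-- Pre_ excludes exactly the indices beyond the string's negative-index range, where both Pythons raise IndexError.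

def pyString : String := "aabbbbba"

-- ===== PORT A =====
-- A's unbounded mutual recursion is made structural with a fuel argument (9 - i).toNat,
-- which always suffices: every recursive call happens only under the guard i < 8.
mutual
def q0F : Nat → Int → Bool
  | 0, _ => false
  | f+1, i =>
    (if i < 8 ∧ PySem.Str.pyGet? pyString i = some 'a' then q0F f (i+1) else false) ||
    (if i < 8 ∧ PySem.Str.pyGet? pyString i = some 'b' then q1F f (i+1) else false)
def q1F : Nat → Int → Bool
  | 0, _ => false
  | f+1, i =>
    (if i < 8 ∧ PySem.Str.pyGet? pyString i = some 'a' then q1F f (i+1) else false) ||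
    (if i < 8 ∧ PySem.Str.pyGet? pyString i = some 'b' then q2F f (i+1) else false)
def q2F : Nat → Int → Bool
  | 0, _ => false
  | f+1, i =>
    (if i < 8 ∧ PySem.Str.pyGet? pyString i = some 'a' then q2F f (i+1) else false) ||
    (if i < 8 ∧ PySem.Str.pyGet? pyString i = some 'b' then q3F f (i+1) else false)
def q3F : Nat → Int → Bool
  | 0, _ => false
  | f+1, i =>
    (if i < 8 ∧ PySem.Str.pyGet? pyString i = some 'a' then q3F f (i+1) else false) ||
    (if i < 8 ∧ PySem.Str.pyGet? pyString i = some 'b' then q4F f (i+1) else false)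
def q4F : Nat → Int → Bool
  | 0, _ => false
  | f+1, i =>
    (if i < 8 ∧ PySem.Str.pyGet? pyString i = some 'a' then q4F f (i+1) else false) ||
    (if i < 8 ∧ PySem.Str.pyGet? pyString i = some 'b' then q5F f (i+1) else false)
def q5F : Nat → Int → Bool
  | 0, _ => false
  | f+1, i =>
    (if i < 8 ∧ PySem.Str.pyGet? pyString i = some 'a' then q5F f (i+1) else false) ||
    (if i < 8 ∧ PySem.Str.pyGet? pyString i = some 'b' then q5F f (i+1) else false) ||
    (if i < 8 ∧ PySem.Str.pyGet? pyString i = some 'a' then q6F f (i+1) else false)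
def q6F : Nat → Int → Bool
  | _, i => i == 8
end

def q0 (i : Int) : Bool := q0F (9 - i).toNat i

-- ===== PORT B =====
-- transition table TRANS of Source B
def pvTrans (s : Nat) (c : Char) : List Nat :=
  match s, c with
  | 0, 'a' => [0] | 0, 'b' => [1]
  | 1, 'a' => [1] | 1, 'b' => [2]
  | 2, 'a' => [2] | 2, 'b' => [3]
  | 3, 'a' => [3] | 3, 'b' => [4]
  | 4, 'a' => [4] | 4, 'b' => [5]
  | 5, 'a' => [5, 6] | 5, 'b' => [5]
  | _, _ => []

-- the set comprehension of Source B
def pvStep (active : PySem.Set Nat) (c : Char) : PySem.Set Nat :=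
  PySem.Set.ofList (active.flatMap (fun s => pvTrans s c))

-- the while loop of Source B, fuel (8 - i).toNat (the guard i < 8 bounds the iterations)
def pvLoop : Nat → Int → PySem.Set Nat → Int × PySem.Set Nat
  | 0, i, a => (i, a)
  | f+1, i, a =>
    if i < 8 ∧ a ≠ [] then
      match PySem.Str.pyGet? pyString i with
      | some c => pvLoop f (i+1) (pvStep a c)
      | none => (i, a)   -- Python raises IndexError here; excluded by Pre_q0
    else (i, a)

def q0_alt (i : Int) : Bool :=
  let r := pvLoop (8 - i).toNat i (PySem.Set.ofList [0])
  (r.1 == 8) && PySem.Set.contains r.2 6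

-- ===== PRECONDITION & SPEC =====
-- excludes exactly the indices beyond the string's negative-index range, on which the Python A (and B) raise IndexError
def Pre_q0 (i : Int) : Prop := -8 ≤ i
instance (i : Int) : Decidable (Pre_q0 i) := by unfold Pre_q0; infer_instance
def pvWitness_q0 : Int := 0
def Spec_q0 (i : Int) (out : Bool) : Prop := out = q0_alt i
instance (i : Int) (out : Bool) : Decidable (Spec_q0 i out) := by unfold Spec_q0; infer_instance

-- ===== CLAIM (what is proved, stated in full; the proofs are below) =====
def Claim_equal_q0 : Prop := ∀ (i : Int), Dom_q0 i → Pre_q0 i → Spec_q0 i (q0 i)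

-- ===== LEMMAS AND PROOFS =====
theorem q0_big (i : Int) (h : 9 ≤ i) : q0 i = q0_alt i := by
  unfold q0 q0_alt
  have h1 : (9 - i).toNat = 0 := by omega
  have h2 : (8 - i).toNat = 0 := by omega
  rw [h1, h2]
  have h3 : (i == (8 : Int)) = false := by
    simp only [beq_eq_false_iff_ne, ne_eq]; omega
  simp [q0F, pvLoop, h3]

-- ===== VERDICT (by name: the statement is the Claim_ definition above) =====
theorem q0_spec : Claim_equal_q0 := by
  intro i _ hpre
  unfold Spec_q0
  by_cases h : i ≤ 8
  · have hl : -8 ≤ i := hpre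
    interval_cases i <;> decide
  · exact q0_big i (by omega)
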